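-- pv_equiv track=rewrite | github.com/ettore-galli/rpiwork | rpi-pico-w/clock/display/fontdsp.py | replace_in_matrix
-- ===== SOURCE A (Python) =====
-- def replace_in_matrix(matrix, r, c, submatrix):
--     return [
--         [
--             submatrix[r_i - r][c_i - c]
--             if r <= r_i < r + len(submatrix) and c <= c_i < c + len(submatrix[0])
--             else element
--             for c_i, element in enumerate(row)
--         ]
--         for r_i, row in enumerate(matrix)
--     ]
-- ===== SOURCE B (Python) =====
-- def replace_in_matrix(matrix, r, c, submatrix):
--     # Row-splice strategy: copy untouched rows whole; for overlapped rows build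
--     # prefix + overlay-segment + suffix instead of testing every cell.
--     if not submatrix:
--         return [row[:] for row in matrix]
--     h = len(submatrix)
--     w = len(submatrix[0])
--     out = []
--     for ri, row in enumerate(matrix):
--         if r <= ri < r + h:
--             srow = submatrix[ri - r]
--             lo = max(c, 0)
--             hi = min(max(c + w, lo), len(row))
--             out.append(row[:lo] + [srow[j - c] for j in range(lo, hi)] + row[hi:])
--         else:
--             out.append(row[:])
--     return out
-- ===== Notes on version B (the rewrite author's own statement) =====
-- stated objective: simpler
-- what changed: B copies untouched rows whole and builds each overlapped row as a three-piece splice (prefix + overlay segment + suffix) with clamped bounds, instead of A's per-cell range test on every cell of the matrix.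
import Mathlib
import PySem

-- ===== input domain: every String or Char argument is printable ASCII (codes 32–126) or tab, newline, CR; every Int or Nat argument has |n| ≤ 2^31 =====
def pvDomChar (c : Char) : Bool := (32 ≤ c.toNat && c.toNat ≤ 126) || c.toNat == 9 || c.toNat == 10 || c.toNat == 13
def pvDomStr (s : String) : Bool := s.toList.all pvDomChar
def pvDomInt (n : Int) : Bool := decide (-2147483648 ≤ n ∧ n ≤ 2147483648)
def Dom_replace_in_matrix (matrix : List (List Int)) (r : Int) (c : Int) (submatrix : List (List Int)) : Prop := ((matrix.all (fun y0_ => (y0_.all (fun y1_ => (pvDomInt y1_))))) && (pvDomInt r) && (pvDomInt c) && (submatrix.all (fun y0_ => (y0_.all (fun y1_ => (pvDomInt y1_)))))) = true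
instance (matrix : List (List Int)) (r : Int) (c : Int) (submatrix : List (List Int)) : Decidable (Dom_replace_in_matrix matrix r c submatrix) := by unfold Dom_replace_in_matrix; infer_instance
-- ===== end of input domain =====

-- B overlays by splicing each affected row (prefix ++ overlay segment ++ suffix) instead of
-- testing every cell of the whole matrix; objective: simpler per-row decomposition, same cost class.

-- ===== PORT A =====
-- Literal transliteration of A's nested comprehension.
-- `len(submatrix[0])` is rendered as (submatrix.headD []).length: when submatrix = [] Python
-- short-circuits before evaluating it and the condition is false; headD [] gives length 0 and
-- the condition is likewise false, so the value is exact. `submatrix[r_i - r]` is in range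
-- whenever the condition holds (pyGetD _ _ [] exact); the inner `[c_i - c]` raises IndexError
-- on ragged submatrix rows — exactly the inputs Pre_ excludes — and is pyGetD _ _ 0.
def replace_in_matrix (matrix : List (List Int)) (r : Int) (c : Int) (submatrix : List (List Int)) : List (List Int) :=
  (PySem.List.enumerate matrix 0).map (fun p =>
    (PySem.List.enumerate p.2 0).map (fun q =>
      if r ≤ p.1 ∧ p.1 < r + (submatrix.length : Int) ∧ c ≤ q.1 ∧ q.1 < c + ((submatrix.headD []).length : Int)
      then PySem.List.pyGetD (PySem.List.pyGetD submatrix (p.1 - r) []) (q.1 - c) 0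
      else q.2))

-- ===== PORT B =====
-- Transliteration of Source B: row[:lo] / row[hi:] with 0 ≤ lo and 0 ≤ hi become take/drop (exact:
-- Python slices clamp, as take/drop do); srow[j - c] is in range exactly when Pre_ holds (pyGetD).
def replace_in_matrix_alt (matrix : List (List Int)) (r : Int) (c : Int) (submatrix : List (List Int)) : List (List Int) :=
  if submatrix.isEmpty then matrix.map (fun row => row)
  else
    let h : Int := submatrix.length
    let w : Int := (submatrix.headD []).length
    (PySem.List.enumerate matrix 0).map (fun p =>
      if r ≤ p.1 ∧ p.1 < r + h then
        let srow := PySem.List.pyGetD submatrix (p.1 - r) []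
        let lo : Int := max c 0
        let hi : Int := min (max (c + w) lo) (p.2.length : Int)
        p.2.take lo.toNat
          ++ (PySem.List.pyRange lo hi 1).map (fun j => PySem.List.pyGetD srow (j - c) 0)
          ++ p.2.drop hi.toNat
      else p.2)

-- ===== PRECONDITION & SPEC =====
-- Pre_ excludes exactly the inputs on which A raises IndexError: a ragged submatrix whose row i
-- is shorter than the first row at a column j that actually lands inside the matrix.  B raises
-- on exactly the same inputs, so nothing on which A returns is excluded.
def Pre_replace_in_matrix (matrix : List (List Int)) (r : Int) (c : Int) (submatrix : List (List Int)) : Prop :=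
  ∀ i ∈ List.range submatrix.length, ∀ j ∈ List.range (submatrix.headD []).length,
    0 ≤ r + (i : Int) → r + (i : Int) < (matrix.length : Int) →
    0 ≤ c + (j : Int) → c + (j : Int) < ((matrix.getD (r + (i : Int)).toNat []).length : Int) →
    j < (submatrix.getD i []).length
instance (matrix : List (List Int)) (r : Int) (c : Int) (submatrix : List (List Int)) : Decidable (Pre_replace_in_matrix matrix r c submatrix) := by unfold Pre_replace_in_matrix; infer_instance

def pvWitness_replace_in_matrix : List (List Int) × Int × Int × List (List Int) :=
  ([[1, 2, 3], [4, 5, 6], [7, 8, 9]], 1, 1, [[0, 0], [0, 0]])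

def Spec_replace_in_matrix (matrix : List (List Int)) (r : Int) (c : Int) (submatrix : List (List Int)) (out : List (List Int)) : Prop := out = replace_in_matrix_alt matrix r c submatrix
instance (matrix : List (List Int)) (r : Int) (c : Int) (submatrix : List (List Int)) (out : List (List Int)) : Decidable (Spec_replace_in_matrix matrix r c submatrix out) := by unfold Spec_replace_in_matrix; infer_instance

-- ===== CLAIM (what is proved, stated in full; the proofs are below) =====
def Claim_equal_replace_in_matrix : Prop := ∀ (matrix : List (List Int)) (r : Int) (c : Int) (submatrix : List (List Int)), Dom_replace_in_matrix matrix r c submatrix → Pre_replace_in_matrix matrix r c submatrix → Spec_replace_in_matrix matrix r c submatrix (replace_in_matrix matrix r c submatrix)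

-- ===== LEMMAS AND PROOFS =====

theorem pv_enum_getElem {α : Type} (xs : List α) (s : Int) (k : Nat)
    (hk : k < xs.length) :
    (PySem.List.enumerate xs s)[k]'(by simpa [PySem.List.length_enumerate] using hk)
      = (s + (k : Int), xs[k]) := by
  induction xs generalizing s k with
  | nil => simp at hk
  | cons x xs ih =>
    cases k with
    | zero => simp [PySem.List.enumerate_cons]
    | succ k =>
      have hk' : k < xs.length := by simpa using hk
      simp [PySem.List.enumerate_cons, ih (s + 1) k hk']
      ring

-- A's inner row, when the row is untouched (condition false on every cell).
theorem pv_row_skip (row : List Int) (f : Int × Int → Int)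
    (hf : ∀ q ∈ PySem.List.enumerate row 0, f q = q.2) :
    (PySem.List.enumerate row 0).map f = row := by
  rw [List.map_congr_left hf]
  exact PySem.List.map_snd_enumerate row 0

-- Core row lemma: the cell-by-cell conditional row equals the three-piece splice.
theorem pv_row_splice (row srow : List Int) (c w : Int) (hw : 0 ≤ w) :
    (PySem.List.enumerate row 0).map (fun q =>
        if c ≤ q.1 ∧ q.1 < c + w then PySem.List.pyGetD srow (q.1 - c) 0 else q.2)
      = row.take (max c 0).toNat
        ++ (PySem.List.pyRange (max c 0) (min (max (c + w) (max c 0)) (row.length : Int)) 1).map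
            (fun j => PySem.List.pyGetD srow (j - c) 0)
        ++ row.drop (min (max (c + w) (max c 0)) (row.length : Int)).toNat := by
  set lo : Int := max c 0 with hlo
  set hi : Int := min (max (c + w) lo) (row.length : Int) with hhi
  have hlo0 : 0 ≤ lo := le_max_right _ _
  have hhi0 : 0 ≤ hi := le_min (le_trans hlo0 (le_max_right _ _)) (Int.natCast_nonneg _)
  have hhilo : hi ≤ (row.length : Int) := min_le_right _ _
  have hmid : ((PySem.List.pyRange lo hi 1).map
      (fun j => PySem.List.pyGetD srow (j - c) 0)).length = (hi - lo).toNat := by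
    simp [PySem.List.length_pyRange_one]
  have htl : (row.take lo.toNat).length = min lo.toNat row.length := by
    simp [List.length_take]
  apply List.ext_getElem
  · simp only [List.length_map, PySem.List.length_enumerate, List.length_append, hmid, htl,
      List.length_drop]
    omega
  · intro k h1 h2
    have hk : k < row.length := by simpa [PySem.List.length_enumerate] using h1
    rw [List.getElem_map, pv_enum_getElem row 0 k hk]
    simp only [List.getElem_append, List.length_append, htl, hmid, List.getElem_take,
      List.getElem_drop, List.getElem_map, PySem.List.getElem_pyRange_one]
    by_cases hc : c ≤ 0 + (k : Int) ∧ 0 + (k : Int) < c + w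
    · rw [if_pos hc]
      split_ifs with hB1 hB2
      · exfalso; omega   -- k < lo contradicts c ≤ k
      · congr 1; omega   -- overlay segment: same source index
      · exfalso; omega   -- hi ≤ k contradicts k < c + w, k < len
    · rw [if_neg hc]
      split_ifs with hB1 hB2
      · rfl             -- prefix keeps row[k]
      · exfalso; omega   -- lo ≤ k < hi would force the condition true
      · congr 1; omega   -- suffix keeps row[k]

theorem replace_spec_aux (matrix : List (List Int)) (r : Int) (c : Int)
    (submatrix : List (List Int)) (_hpre : Pre_replace_in_matrix matrix r c submatrix) :
    replace_in_matrix matrix r c submatrix = replace_in_matrix_alt matrix r c submatrix := by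
  unfold replace_in_matrix replace_in_matrix_alt
  by_cases hs : submatrix.isEmpty
  · -- empty submatrix: A's condition is false everywhere; B returns the copy
    have hlen : submatrix.length = 0 := by simpa [List.isEmpty_iff_length_eq_zero] using hs
    simp only [hs, if_pos, List.map_id']
    apply List.ext_getElem
    · simp [PySem.List.length_enumerate]
    · intro k h1 h2
      have hk : k < matrix.length := by simpa [PySem.List.length_enumerate] using h1
      rw [List.getElem_map, pv_enum_getElem matrix 0 k hk]
      apply pv_row_skip
      intro q _
      exact if_neg (by rw [hlen]; push_cast; omega)
  · simp only [hs, if_neg, Bool.false_eq_true, not_false_iff]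
    apply List.map_congr_left
    intro p hp
    obtain ⟨k, hk, hpk⟩ := List.mem_iff_getElem.mp hp
    have hk' : k < matrix.length := by simpa [PySem.List.length_enumerate] using hk
    rw [pv_enum_getElem matrix 0 k hk'] at hpk
    subst hpk
    simp only
    by_cases hr : r ≤ 0 + (k : Int) ∧ 0 + (k : Int) < r + (submatrix.length : Int)
    · rw [if_pos hr]
      have hfun : ∀ q ∈ PySem.List.enumerate matrix[k] 0,
          (if r ≤ 0 + (k : Int) ∧ 0 + (k : Int) < r + (submatrix.length : Int) ∧
              c ≤ q.1 ∧ q.1 < c + ((submatrix.headD []).length : Int)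
           then PySem.List.pyGetD (PySem.List.pyGetD submatrix (0 + (k : Int) - r) []) (q.1 - c) 0
           else q.2)
          = (if c ≤ q.1 ∧ q.1 < c + ((submatrix.headD []).length : Int)
             then PySem.List.pyGetD (PySem.List.pyGetD submatrix (0 + (k : Int) - r) []) (q.1 - c) 0
             else q.2) := by
        intro q _
        by_cases hc : c ≤ q.1 ∧ q.1 < c + ((submatrix.headD []).length : Int)
        · rw [if_pos ⟨hr.1, hr.2, hc.1, hc.2⟩, if_pos hc]
        · rw [if_neg (by tauto), if_neg hc]
      rw [List.map_congr_left hfun,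
          pv_row_splice matrix[k] (PySem.List.pyGetD submatrix (0 + (k : Int) - r) []) c
            ((submatrix.headD []).length : Int) (Int.natCast_nonneg _)]
    · rw [if_neg hr]
      apply pv_row_skip
      intro q _
      exact if_neg (by tauto)

-- ===== VERDICT (by name: the statement is the Claim_ definition above) =====
theorem replace_in_matrix_spec : Claim_equal_replace_in_matrix := by
  intro matrix r c submatrix _ hpre
  unfold Spec_replace_in_matrix
  exact replace_spec_aux matrix r c submatrix hpre
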